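-- pv_equiv track=rewrite | github.com/nd-cse-30872-su24/cse-30872-su24-examples | lecture10/exercise10-B/solution.py | walk1
-- ===== SOURCE A (Python) =====
-- Graph = dict[int, set[int]]
--
-- def walk1(g: Graph, n: int, color: int, visited: dict[int, int]) -> bool:
--     ''' Recursively walk graph and verifying that the node has the appropriate
--     color. '''
--
--     # We have already visited this node, so verify we still have the same
--     # color.
--     if n in visited:
--         return visited[n] == color
--
--     # We have not visited this node yet, so store its color.
--     visited[n] = color
--
--     # Visit each neighbor recursively with the alternate color and check that
--     # they are colorable.
--     for v in g[n]:
--         if not walk1(g, v, (color + 1) % 2, visited):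
--             return False
--
--     return True
-- ===== SOURCE B (Python) =====
-- def walk1(g, n, color, visited):
--     ''' Iteratively walk graph with an explicit stack and verify that every
--     node gets the appropriate color. '''
--     stack = [(n, color)]
--     while stack:
--         node, c = stack.pop()
--         if node in visited:
--             if visited[node] != c:
--                 return False
--             continue
--         visited[node] = c
--         stack.extend((v, (c + 1) % 2) for v in reversed(list(g[node])))
--     return True
-- ===== Notes on version B (the rewrite author's own statement) =====
-- stated objective: alternative
-- what changed: The recursive DFS (per-node recursion with an early-exit for-loop over neighbors) is replaced by an iterative DFS driven by an explicit stack of (node, color) pairs, popping in the recursion's preorder; no recursion and no per-call Python frames.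
-- outside the precondition, e.g. on walk1({0: set(), 1: {5}}, 0, 0, {}): A returns True, B returns True; on walk1({}, 3, 0, {}): A raises KeyError, B raises KeyError
import Mathlib
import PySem

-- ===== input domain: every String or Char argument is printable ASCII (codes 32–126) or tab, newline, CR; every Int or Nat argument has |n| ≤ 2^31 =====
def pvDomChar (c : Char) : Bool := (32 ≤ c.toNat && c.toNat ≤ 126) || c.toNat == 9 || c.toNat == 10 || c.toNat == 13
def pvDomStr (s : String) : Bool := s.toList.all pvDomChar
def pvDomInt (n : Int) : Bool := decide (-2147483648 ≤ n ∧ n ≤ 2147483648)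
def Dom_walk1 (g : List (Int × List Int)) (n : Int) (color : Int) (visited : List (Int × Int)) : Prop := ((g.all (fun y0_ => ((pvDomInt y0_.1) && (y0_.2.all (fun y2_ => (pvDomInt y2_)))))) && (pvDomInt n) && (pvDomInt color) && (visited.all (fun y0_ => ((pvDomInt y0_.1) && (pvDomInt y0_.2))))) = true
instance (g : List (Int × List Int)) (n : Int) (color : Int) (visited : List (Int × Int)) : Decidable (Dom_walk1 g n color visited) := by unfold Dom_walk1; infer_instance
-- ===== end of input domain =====

-- B replaces A's recursive DFS by an explicit-stack iterative DFS with the same preorder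
-- and the same return value; both Pythons mutate `visited` in place identically — the
-- theorems here are about the RETURN value only. The Nat fuel in both ports is only a
-- totality device: on every input admitted by Pre_ it is proved sufficient (neither
-- `getD false` default ever fires there).

-- ===== PORT A =====
-- Recursive DFS, transliterated: `walkA` is one call of Python's walk1 (returning the
-- result together with the mutated dict) and `walkAList` is its `for v in g[n]` loop with
-- the early `return False`.  `none` = fuel ran out or Python's KeyError on `g[n]`.
mutual
def walkA (fuel : Nat) (gd : PySem.Dict Int (List Int)) (n : Int) (c : Int)
    (v : PySem.Dict Int Int) : Option (Bool × PySem.Dict Int Int) :=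
  match fuel with
  | 0 => none
  | f + 1 =>
    match v.get? n with
    | some col => some (col == c, v)                    -- n in visited: visited[n] == color
    | none =>
      match gd.get? n with
      | none => none                                    -- Python raises KeyError on g[n]
      | some ns => walkAList f gd ns (PySem.Int.mod (c + 1) 2) (v.insert n c)
termination_by (fuel, 0)

def walkAList (fuel : Nat) (gd : PySem.Dict Int (List Int)) (ns : List Int) (c2 : Int)
    (v : PySem.Dict Int Int) : Option (Bool × PySem.Dict Int Int) :=
  match ns with
  | [] => some (true, v)
  | x :: xs =>
    match walkA fuel gd x c2 v with
    | none => none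
    | some (false, v') => some (false, v')              -- `return False`
    | some (true, v') => walkAList fuel gd xs c2 v'
termination_by (fuel, ns.length + 1)
end

def walk1 (g : List (Int × List Int)) (n : Int) (color : Int) (visited : List (Int × Int)) : Bool :=
  ((walkA (g.length + 1) (PySem.Dict.ofList g) n color (PySem.Dict.ofList visited)).map Prod.fst).getD false

-- ===== PORT B =====
-- max neighbor-list length in g (only used to size B's fuel)
def maxDeg (g : List (Int × List Int)) : Nat :=
  g.foldl (fun a p => max a p.2.length) 0

-- Iterative DFS over an explicit stack (head of the list = top of the stack; Python's
-- `stack.extend(... reversed(list(g[node])))` followed by `pop()` from the end delivers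
-- g[node] in order, i.e. prepends `ns` in order here).  `none` = fuel ran out / KeyError.
def walkB (fuel : Nat) (gd : PySem.Dict Int (List Int)) (st : List (Int × Int))
    (v : PySem.Dict Int Int) : Option Bool :=
  match fuel, st with
  | _, [] => some true
  | 0, _ :: _ => none
  | f + 1, (node, c) :: st' =>
    match v.get? node with
    | some col => if col != c then some false else walkB f gd st' v
    | none =>
      match gd.get? node with
      | none => none                                    -- Python raises KeyError on g[node]
      | some ns => walkB f gd (ns.map (fun x => (x, PySem.Int.mod (c + 1) 2)) ++ st') (v.insert node c)

def walk1_alt (g : List (Int × List Int)) (n : Int) (color : Int) (visited : List (Int × Int)) : Bool :=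
  -- fuel bounds the number of pops; proved sufficient on Pre_ (walk_sim below)
  ((walkB ((maxDeg g + 1) ^ (g.length + 1)) (PySem.Dict.ofList g) [(n, color)] (PySem.Dict.ofList visited)).getD false)

-- ===== PRECONDITION & SPEC =====
-- Pre_ excludes the inputs on which the traversal reaches a node that is not a key of the
-- dict g (Python raises KeyError there).  As a closed-form condition it requires n (unless
-- already a key of visited) and every neighbor listed anywhere in g to be a key of g or of
-- visited; this is slightly narrower than A's run-time behaviour: it also excludes graphs
-- whose dangling neighbors happen never to be reached (A then returns normally, and so
-- does B — see the cite in claim.json).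
def Pre_walk1 (g : List (Int × List Int)) (n : Int) (color : Int) (visited : List (Int × Int)) : Prop :=
  n ∈ visited.map Prod.fst ∨
    (n ∈ g.map Prod.fst ∧ ∀ p ∈ g, ∀ x ∈ p.2, x ∈ g.map Prod.fst ∨ x ∈ visited.map Prod.fst)
instance (g : List (Int × List Int)) (n : Int) (color : Int) (visited : List (Int × Int)) : Decidable (Pre_walk1 g n color visited) := by unfold Pre_walk1; infer_instance

def pvWitness_walk1 : (List (Int × List Int)) × Int × Int × (List (Int × Int)) :=
  ([(0, [1, 2]), (1, [0]), (2, [0])], 0, 0, [])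

def Spec_walk1 (g : List (Int × List Int)) (n : Int) (color : Int) (visited : List (Int × Int)) (out : Bool) : Prop := out = walk1_alt g n color visited
instance (g : List (Int × List Int)) (n : Int) (color : Int) (visited : List (Int × Int)) (out : Bool) : Decidable (Spec_walk1 g n color visited out) := by unfold Spec_walk1; infer_instance

-- ===== CLAIM (what is proved, stated in full; the proofs are below) =====
def Claim_equal_walk1 : Prop := ∀ (g : List (Int × List Int)) (n : Int) (color : Int) (visited : List (Int × Int)), Dom_walk1 g n color visited → Pre_walk1 g n color visited → Spec_walk1 g n color visited (walk1 g n color visited)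

-- ===== LEMMAS AND PROOFS =====

-- number of entries of gd whose key is still unvisited: A's recursion-depth measure
def unvis (gd : PySem.Dict Int (List Int)) (v : PySem.Dict Int Int) : Nat :=
  gd.items.countP (fun p => (v.get? p.1).isNone)

theorem countP_lt_of_mem {α : Type} {l : List α} {p q : α → Bool} {a : α}
    (ha : a ∈ l) (hq : q a = true) (hp : p a = false) (h : ∀ x ∈ l, p x = true → q x = true) :
    l.countP p < l.countP q := by
  induction l with
  | nil => simp at ha
  | cons y ys ih =>
    rcases List.mem_cons.mp ha with rfl | hmem
    · have h1 : ys.countP p ≤ ys.countP q :=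
        List.countP_mono_left (fun x hx hxp => h x (List.mem_cons_of_mem _ hx) hxp)
      simp [hp, hq]; omega
    · have h1 := ih hmem (fun x hx hxp => h x (List.mem_cons_of_mem _ hx) hxp)
      have h2 : (if p y then 1 else 0) ≤ (if q y then 1 else 0) := by
        by_cases hy : p y = true
        · simp [hy, h y List.mem_cons_self hy]
        · simp [Bool.eq_false_iff.mpr hy]
      simp only [List.countP_cons]; omega

theorem unvis_mono (gd : PySem.Dict Int (List Int)) (v w : PySem.Dict Int Int)
    (h : ∀ k, (v.get? k).isSome → (w.get? k).isSome) : unvis gd w ≤ unvis gd v := by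
  unfold unvis
  apply List.countP_mono_left
  intro p _ hw
  rw [Option.isNone_iff_eq_none] at *
  by_contra hv
  have := h p.1 (Option.isSome_iff_ne_none.mpr (by simpa using hv))
  simp [hw] at this

theorem unvis_insert_lt (gd : PySem.Dict Int (List Int)) (v : PySem.Dict Int Int)
    {n : Int} {ns : List Int} (hv : v.get? n = none)
    (hg : gd.get? n = some ns) (c : Int) : unvis gd (v.insert n c) < unvis gd v := by
  unfold unvis
  apply countP_lt_of_mem (a := (n, ns)) (PySem.Dict.mem_items_of_get?_eq_some gd hg)
  · simp [hv]
  · simp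
  · intro x hx hxp
    simp only [Option.isNone_iff_eq_none, PySem.Dict.get?_insert] at hxp ⊢
    split at hxp
    · simp at hxp
    · exact hxp

-- visited keys only grow along A's recursion
theorem walk_mono (f : Nat) :
    (∀ (gd : PySem.Dict Int (List Int)) (n c : Int) (v : PySem.Dict Int Int) r v',
      walkA f gd n c v = some (r, v') → ∀ k, (v.get? k).isSome → (v'.get? k).isSome) ∧
    (∀ (gd : PySem.Dict Int (List Int)) (ns : List Int) (c2 : Int) (v : PySem.Dict Int Int) r v',
      walkAList f gd ns c2 v = some (r, v') → ∀ k, (v.get? k).isSome → (v'.get? k).isSome) := by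
  induction f with
  | zero =>
    constructor
    · intro gd n c v r v' h; simp [walkA] at h
    · intro gd ns c2 v r v' h k hk
      match ns with
      | [] => simp [walkAList] at h; obtain ⟨_, rfl⟩ := h; exact hk
      | x :: xs => simp [walkAList, walkA] at h
  | succ f ih =>
    have hA : ∀ (gd : PySem.Dict Int (List Int)) (n c : Int) (v : PySem.Dict Int Int) r v',
        walkA (f+1) gd n c v = some (r, v') → ∀ k, (v.get? k).isSome → (v'.get? k).isSome := by
      intro gd n c v r v' h k hk
      rw [walkA] at h
      cases hv : v.get? n with
      | some col => simp [hv] at h; obtain ⟨_, rfl⟩ := h; exact hk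
      | none =>
        cases hg : gd.get? n with
        | none => simp [hv, hg] at h
        | some ns =>
          simp only [hv, hg] at h
          have := ih.2 gd ns _ _ r v' h k
          apply this
          simp only [PySem.Dict.get?_insert]
          split
          · simp
          · exact hk
    refine ⟨hA, ?_⟩
    intro gd ns c2 v r v' h
    induction ns generalizing v with
    | nil =>
      simp only [walkAList, Option.some.injEq, Prod.mk.injEq] at h
      obtain ⟨_, rfl⟩ := h; intro k hk; exact hk
    | cons x xs ihl =>
      rw [walkAList] at h
      cases hx : walkA (f+1) gd x c2 v with
      | none => simp [hx] at h
      | some p =>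
        obtain ⟨b, v1⟩ := p
        cases b with
        | false => simp [hx] at h; obtain ⟨rfl, rfl⟩ := h; exact fun k hk => hA gd x c2 v _ _ hx k hk
        | true =>
          simp only [hx] at h
          intro k hk
          exact ihl v1 h k (hA gd x c2 v _ _ hx k hk)

-- fuel sufficiency for A: with more fuel than there are unvisited keys of g, walkA returns
theorem walk_suff (gd : PySem.Dict Int (List Int)) (v0 : PySem.Dict Int Int)
    (hclosed : ∀ p ∈ gd.items, ∀ x ∈ p.2, (gd.get? x).isSome ∨ (v0.get? x).isSome) :
    ∀ f : Nat,
    (∀ (n c : Int) (v : PySem.Dict Int Int), (∀ k, (v0.get? k).isSome → (v.get? k).isSome) →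
      unvis gd v < f → ((v.get? n).isSome ∨ (gd.get? n).isSome) → (walkA f gd n c v).isSome) ∧
    (∀ (ns : List Int) (c2 : Int) (v : PySem.Dict Int Int), (∀ k, (v0.get? k).isSome → (v.get? k).isSome) →
      unvis gd v < f → (∀ x ∈ ns, (gd.get? x).isSome ∨ (v0.get? x).isSome) →
      (walkAList f gd ns c2 v).isSome) := by
  intro f
  induction f with
  | zero => exact ⟨fun n c v _ hu => absurd hu (by omega), fun ns c2 v _ hu => absurd hu (by omega)⟩
  | succ f ih =>
    have hA : ∀ (n c : Int) (v : PySem.Dict Int Int), (∀ k, (v0.get? k).isSome → (v.get? k).isSome) →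
        unvis gd v < f + 1 → ((v.get? n).isSome ∨ (gd.get? n).isSome) → (walkA (f+1) gd n c v).isSome := by
      intro n c v hsub hu hn
      rw [walkA]
      cases hv : v.get? n with
      | some col => simp
      | none =>
        cases hg : gd.get? n with
        | none =>
          rcases hn with hn | hn
          · simp [hv] at hn
          · simp [hg] at hn
        | some ns =>
          simp only []
          apply (ih.2) ns _ (v.insert n c)
          · intro k hk
            simp only [PySem.Dict.get?_insert]
            split
            · simp
            · exact hsub k hk
          · have := unvis_insert_lt gd v hv hg c
            omega
          · exact hclosed (n, ns) (PySem.Dict.mem_items_of_get?_eq_some gd hg)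
    refine ⟨hA, ?_⟩
    intro ns c2 v hsub hu hns
    induction ns generalizing v with
    | nil => rw [walkAList]; simp
    | cons x xs ihl =>
      rw [walkAList]
      have hx : (walkA (f+1) gd x c2 v).isSome := by
        apply hA x c2 v hsub hu
        rcases hns x (by simp) with h | h
        · exact Or.inr h
        · exact Or.inl (hsub x h)
      cases hwa : walkA (f+1) gd x c2 v with
      | none => rw [hwa] at hx; simp at hx
      | some p =>
        obtain ⟨b, v1⟩ := p
        cases b with
        | false => simp
        | true =>
          simp only []
          have hmono := (walk_mono (f+1)).1 gd x c2 v true v1 hwa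
          apply ihl v1 (fun k hk => hmono k (hsub k hk))
          · have := unvis_mono gd v v1 hmono; omega
          · intro y hy; exact hns y (by simp [hy])

-- simulation: one completed call of A's recursion is a block of pops of B's stack loop
theorem walk_sim (gd : PySem.Dict Int (List Int)) (D : Nat)
    (hdeg : ∀ (n : Int) (ns : List Int), gd.get? n = some ns → ns.length ≤ D) :
    ∀ f : Nat,
    (∀ (n c : Int) (v : PySem.Dict Int Int) (r : Bool) (v' : PySem.Dict Int Int),
      walkA f gd n c v = some (r, v') → ∃ k ≤ (D+1)^f, ∀ (fb : Nat) (st : List (Int × Int)),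
        walkB (k + fb) gd ((n, c) :: st) v = if r then walkB fb gd st v' else some false) ∧
    (∀ (ns : List Int) (c2 : Int) (v : PySem.Dict Int Int) (r : Bool) (v' : PySem.Dict Int Int),
      walkAList f gd ns c2 v = some (r, v') → ∃ k ≤ ns.length * (D+1)^f, ∀ (fb : Nat) (st : List (Int × Int)),
        walkB (k + fb) gd (ns.map (fun x => (x, c2)) ++ st) v = if r then walkB fb gd st v' else some false) := by
  intro f
  induction f with
  | zero =>
    constructor
    · intro n c v r v' h; simp [walkA] at h
    · intro ns c2 v r v' h
      match ns with
      | [] =>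
        simp only [walkAList, Option.some.injEq, Prod.mk.injEq] at h
        obtain ⟨rfl, rfl⟩ := h
        exact ⟨0, by simp, fun fb st => by simp⟩
      | x :: xs => simp [walkAList, walkA] at h
  | succ f ih =>
    have hpow : 1 ≤ (D+1)^f := Nat.one_le_pow _ _ (by omega)
    have hA : ∀ (n c : Int) (v : PySem.Dict Int Int) (r : Bool) (v' : PySem.Dict Int Int),
        walkA (f+1) gd n c v = some (r, v') → ∃ k ≤ (D+1)^(f+1), ∀ (fb : Nat) (st : List (Int × Int)),
        walkB (k + fb) gd ((n, c) :: st) v = if r then walkB fb gd st v' else some false := by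
      intro n c v r v' h
      rw [walkA] at h
      cases hv : v.get? n with
      | some col =>
        simp only [hv, Option.some.injEq, Prod.mk.injEq] at h
        obtain ⟨rfl, rfl⟩ := h
        refine ⟨1, le_trans hpow (Nat.pow_le_pow_right (by omega) (by omega)), ?_⟩
        intro fb st
        have h1 : 1 + fb = fb + 1 := by omega
        rw [h1, walkB]
        simp only [hv]
        by_cases hcol : col = c <;> simp [hcol]
      | none =>
        cases hg : gd.get? n with
        | none => simp [hv, hg] at h
        | some ns =>
          simp only [hv, hg] at h
          obtain ⟨k, hk, hsim⟩ := ih.2 ns (PySem.Int.mod (c+1) 2) (v.insert n c) r v' h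
          refine ⟨k + 1, ?_, ?_⟩
          · have hlen : ns.length ≤ D := hdeg n ns hg
            have : k ≤ D * (D+1)^f := le_trans hk (Nat.mul_le_mul_right _ hlen)
            calc k + 1 ≤ D * (D+1)^f + (D+1)^f := by omega
              _ = (D+1)^(f+1) := by ring
          · intro fb st
            have h1 : k + 1 + fb = (k + fb) + 1 := by omega
            rw [h1, walkB]
            simp only [hv, hg]
            exact hsim fb st
    refine ⟨hA, ?_⟩
    intro ns c2 v r v' h
    induction ns generalizing v with
    | nil =>
      simp only [walkAList, Option.some.injEq, Prod.mk.injEq] at h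
      obtain ⟨rfl, rfl⟩ := h
      exact ⟨0, by simp, fun fb st => by simp⟩
    | cons x xs ihl =>
      rw [walkAList] at h
      cases hwa : walkA (f+1) gd x c2 v with
      | none => rw [hwa] at h; simp at h
      | some p =>
        obtain ⟨b, v1⟩ := p
        obtain ⟨k1, hk1, hsim1⟩ := hA x c2 v b v1 hwa
        cases b with
        | false =>
          rw [hwa] at h
          simp only [Option.some.injEq, Prod.mk.injEq] at h
          obtain ⟨rfl, rfl⟩ := h
          refine ⟨k1, le_trans hk1 (Nat.le_mul_of_pos_left ((D+1)^(f+1)) (show 0 < (x::xs).length from by simp)), ?_⟩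
          intro fb st
          have := hsim1 fb (xs.map (fun x => (x, c2)) ++ st)
          simpa using this
        | true =>
          rw [hwa] at h
          simp only [] at h
          obtain ⟨k2, hk2, hsim2⟩ := ihl v1 h
          refine ⟨k1 + k2, ?_, ?_⟩
          · calc k1 + k2 ≤ (D+1)^(f+1) + xs.length * (D+1)^(f+1) := by omega
              _ = (x :: xs).length * (D+1)^(f+1) := by simp [List.length_cons]; ring
          · intro fb st
            have h1 := hsim1 (k2 + fb) (xs.map (fun x => (x, c2)) ++ st)
            have h2 := hsim2 fb st
            simp only [if_true] at h1
            calc walkB (k1 + k2 + fb) gd ((x :: xs).map (fun x => (x, c2)) ++ st) v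
                = walkB (k1 + (k2 + fb)) gd ((x, c2) :: (xs.map (fun x => (x, c2)) ++ st)) v := by
                  congr 1; omega
              _ = walkB (k2 + fb) gd (xs.map (fun x => (x, c2)) ++ st) v1 := h1
              _ = if r then walkB fb gd st v' else some false := h2

theorem keys_ofList {ν : Type} (l : List (Int × ν)) :
    (PySem.Dict.ofList l).keys = PySem.Set.ofList (l.map Prod.fst) := by
  have h := PySem.Dict.keys_foldl_insert_key (ν := ν) l Prod.fst (fun _ p => p.2) PySem.Dict.empty
  simpa [PySem.Dict.ofList, PySem.Dict.update, PySem.Dict.keys_empty, PySem.Set.update_nil_left] using h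

theorem contains_ofList {ν : Type} (l : List (Int × ν)) (k : Int) :
    (PySem.Dict.ofList l).contains k = true ↔ k ∈ l.map Prod.fst := by
  rw [PySem.Dict.contains_iff_mem_keys, keys_ofList, PySem.Set.mem_ofList]

theorem items_foldl_subset {ν : Type} (l : List (Int × ν)) (d : PySem.Dict Int ν) (S : List (Int × ν))
    (hd : ∀ p ∈ d.items, p ∈ S) (hl : ∀ p ∈ l, p ∈ S) :
    ∀ p ∈ (List.foldl (fun acc p => acc.insert p.1 p.2) d l).items, p ∈ S := by
  induction l generalizing d with
  | nil => simpa using hd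
  | cons y ys ih =>
    simp only [List.foldl_cons]
    apply ih
    · intro p hp
      rcases (PySem.Dict.mem_items_insert _ _ _ _).mp hp with rfl | ⟨hpd, _⟩
      · exact hl y (by simp)
      · exact hd p hpd
    · intro p hp; exact hl p (by simp [hp])

theorem items_ofList_subset {ν : Type} (l : List (Int × ν)) :
    ∀ p ∈ (PySem.Dict.ofList l).items, p ∈ l := by
  have := items_foldl_subset l PySem.Dict.empty l (by simp [PySem.Dict.empty]) (fun p hp => hp)
  simpa [PySem.Dict.ofList, PySem.Dict.update] using this

theorem le_foldl_maxDeg : ∀ (g : List (Int × List Int)) (a : Nat),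
    a ≤ List.foldl (fun a p => max a p.2.length) a g := by
  intro g
  induction g with
  | nil => intro a; simp
  | cons q qs ih => intro a; exact le_trans (Nat.le_max_left _ _) (ih _)

theorem len_le_maxDeg : ∀ (g : List (Int × List Int)) (a : Nat) (p : Int × List Int),
    p ∈ g → p.2.length ≤ List.foldl (fun a p => max a p.2.length) a g := by
  intro g
  induction g with
  | nil => intro a p hp; simp at hp
  | cons q qs ih =>
    intro a p hp
    rcases List.mem_cons.mp hp with rfl | hp
    · exact le_trans (Nat.le_max_right _ _) (le_foldl_maxDeg qs _)
    · exact ih _ p hp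

theorem items_foldl_insert_length_le {ν : Type} :
    ∀ (l : List (Int × ν)) (d : PySem.Dict Int ν),
    (List.foldl (fun acc p => acc.insert p.1 p.2) d l).items.length ≤ d.items.length + l.length := by
  intro l
  induction l with
  | nil => intro d; simp
  | cons q qs ih =>
    intro d
    refine le_trans (ih _) ?_
    have : (d.insert q.1 q.2).items.length ≤ d.items.length + 1 := by
      rw [PySem.Dict.items_insert]
      split <;> simp
    simp only [List.length_cons]; omega

theorem items_ofList_length_le {ν : Type} (l : List (Int × ν)) :
    (PySem.Dict.ofList l).items.length ≤ l.length := by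
  have := items_foldl_insert_length_le l (PySem.Dict.empty)
  simpa [PySem.Dict.ofList, PySem.Dict.update, PySem.Dict.empty] using this

-- ===== VERDICT (by name: the statement is the Claim_ definition above) =====
theorem walk1_spec : Claim_equal_walk1 := by
  intro g n color visited _ hpre
  unfold Spec_walk1 walk1 walk1_alt
  set gd := PySem.Dict.ofList g with hgd
  set vd := PySem.Dict.ofList visited with hvd
  -- A's run returns some value on Pre_
  have hmem_v : ∀ k : Int, k ∈ visited.map Prod.fst → (vd.get? k).isSome := by
    intro k hk
    rw [← PySem.Dict.contains_eq_isSome_get?]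
    exact (contains_ofList visited k).mpr hk
  have hmem_g : ∀ k : Int, k ∈ g.map Prod.fst → (gd.get? k).isSome := by
    intro k hk
    rw [← PySem.Dict.contains_eq_isSome_get?]
    exact (contains_ofList g k).mpr hk
  have hu : unvis gd vd < g.length + 1 := by
    have h1 : unvis gd vd ≤ gd.items.length := List.countP_le_length
    have h2 : gd.items.length ≤ g.length := by rw [hgd]; exact items_ofList_length_le g
    omega
  have hsomeA : (walkA (g.length + 1) gd n color vd).isSome := by
    rcases hpre with hn | ⟨hn, hcl⟩
    · -- n is already a key of visited: walkA returns at once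
      rw [walkA]
      rcases Option.isSome_iff_exists.mp (hmem_v n hn) with ⟨col, hcol⟩
      simp [hcol]
    · -- closed graph: fuel sufficiency
      apply (walk_suff gd vd ?_ (g.length + 1)).1 n color vd (fun k hk => hk) hu
        (Or.inr (hmem_g n hn))
      intro p hp x hx
      rcases hcl p (items_ofList_subset g p hp) x hx with h | h
      · exact Or.inl (hmem_g x h)
      · exact Or.inr (hmem_v x h)
  rcases Option.isSome_iff_exists.mp hsomeA with ⟨⟨r, v'⟩, hA⟩
  -- degree bound for B's fuel
  have hdeg : ∀ (m : Int) (ns : List Int), gd.get? m = some ns → ns.length ≤ maxDeg g := by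
    intro m ns hm
    exact len_le_maxDeg g 0 (m, ns) (items_ofList_subset g (m, ns) (PySem.Dict.mem_items_of_get?_eq_some gd hm))
  obtain ⟨k, hk, hsim⟩ := (walk_sim gd (maxDeg g) hdeg (g.length + 1)).1 n color vd r v' hA
  have hfb : k + ((maxDeg g + 1) ^ (g.length + 1) - k) = (maxDeg g + 1) ^ (g.length + 1) := by omega
  have hB := hsim ((maxDeg g + 1) ^ (g.length + 1) - k) []
  rw [hfb] at hB
  rw [hA, hB]
  cases r with
  | false => simp
  | true => simp [walkB]
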